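-- pv_equiv track=rewrite | github.com/Luke445/bad-chess-engine | move_maker.py | getKingMovesForPos
-- ===== SOURCE A (Python) =====
-- KING_OFFSETS = [-9, -8, -7, -1, 1, 7, 8, 9]
--
-- def FILE(x):
--     return x & 7
--
-- def getKingMovesForPos(pos):
--     out = []
--     # --- king moves ---
--     for offset in KING_OFFSETS:
--         next = pos + offset
--         if next in range(0, 64) and abs(FILE(next) - FILE(pos)) <= 1:
--             out.append(next)
--     out.insert(0, (len(out) + 1))
--
--     return out
-- ===== SOURCE B (Python) =====
-- def getKingMovesForPos(pos):
--     out = [t for t in range(64)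
--            if abs(t // 8 - pos // 8) <= 1 and abs(t % 8 - pos % 8) <= 1 and t != pos]
--     return [len(out) + 1] + out
-- ===== Notes on version B (the rewrite author's own statement) =====
-- stated objective: alternative
-- what changed: B scans every board square once and keeps those at Chebyshev distance exactly one from pos (rank and file differences at most one, the square itself excluded), instead of A generating candidate squares from a precomputed offset list and validating each with a range check and a bitmask FILE wrap test.
import Mathlib
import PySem

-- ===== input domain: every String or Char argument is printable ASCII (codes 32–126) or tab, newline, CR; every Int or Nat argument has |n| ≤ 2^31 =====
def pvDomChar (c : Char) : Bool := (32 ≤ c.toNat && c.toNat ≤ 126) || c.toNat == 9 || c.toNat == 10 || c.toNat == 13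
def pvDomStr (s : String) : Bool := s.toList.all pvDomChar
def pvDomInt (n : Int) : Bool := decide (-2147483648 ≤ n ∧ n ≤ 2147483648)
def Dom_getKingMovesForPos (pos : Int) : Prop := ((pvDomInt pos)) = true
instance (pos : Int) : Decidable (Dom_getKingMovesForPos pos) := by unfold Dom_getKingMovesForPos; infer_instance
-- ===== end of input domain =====

-- B scans all 64 board squares and keeps those at Chebyshev distance 1 from pos, instead of
-- A's generation of 8 candidates from an offset list with a range + bitmask file-wrap test
-- (objective: alternative; same cost).

-- ===== PORT A =====
def KING_OFFSETS : List Int := [-9, -8, -7, -1, 1, 7, 8, 9]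

-- FILE(x) = x & 7 (Python bitwise and, exact on negatives via PySem.Int.band)
def FILE (x : Int) : Int := PySem.Int.band x 7

def getKingMovesForPos (pos : Int) : List Int :=
  let out := KING_OFFSETS.foldl (fun out offset =>
    let next := pos + offset
    if (0 ≤ next ∧ next < 64) ∧ |FILE next - FILE pos| ≤ 1 then out ++ [next] else out) []
  ((out.length : Int) + 1) :: out

-- ===== PORT B =====
def getKingMovesForPos_alt (pos : Int) : List Int :=
  let out := (PySem.List.pyRange 0 64 1).filter (fun t =>
    decide (|PySem.Int.floordiv t 8 - PySem.Int.floordiv pos 8| ≤ 1 ∧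
            |PySem.Int.mod t 8 - PySem.Int.mod pos 8| ≤ 1 ∧ t ≠ pos))
  ((out.length : Int) + 1) :: out

-- ===== PRECONDITION & SPEC =====
def Spec_getKingMovesForPos (pos : Int) (out : List Int) : Prop := out = getKingMovesForPos_alt pos
instance (pos : Int) (out : List Int) : Decidable (Spec_getKingMovesForPos pos out) := by unfold Spec_getKingMovesForPos; infer_instance

-- ===== CLAIM (what is proved, stated in full; the proofs are below) =====
def Claim_equal_getKingMovesForPos : Prop := ∀ (pos : Int), Dom_getKingMovesForPos pos → Spec_getKingMovesForPos pos (getKingMovesForPos pos)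

-- ===== LEMMAS AND PROOFS =====

-- x & 7 is x mod 8, for every integer x.
theorem band7 (x : Int) : FILE x = x % 8 := by
  have h7 : ∀ n : Nat, 7 &&& n = n % 8 := fun n => by
    rw [Nat.and_comm]; simpa using Nat.and_two_pow_sub_one_eq_mod n 3
  unfold FILE PySem.Int.band
  split_ifs with h h1 h1
  · rw [show ((7:Int)).toNat = 7 from rfl, Nat.and_comm, h7]; omega
  · exact absurd (by norm_num : (0:Int) ≤ 7) h1
  · rw [show ((7:Int)).toNat = 7 from rfl, h7]; omega
  · exact absurd (by norm_num : (0:Int) ≤ 7) h1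

-- A's accepted squares, in offset order.
def aList (pos : Int) : List Int :=
  (KING_OFFSETS.filter (fun offset =>
    decide ((0 ≤ pos + offset ∧ pos + offset < 64) ∧
            |FILE (pos + offset) - FILE pos| ≤ 1))).map (fun offset => pos + offset)

-- B's accepted squares, in board order.
def bList (pos : Int) : List Int :=
  (PySem.List.pyRange 0 64 1).filter (fun t =>
    decide (|PySem.Int.floordiv t 8 - PySem.Int.floordiv pos 8| ≤ 1 ∧
            |PySem.Int.mod t 8 - PySem.Int.mod pos 8| ≤ 1 ∧ t ≠ pos))

theorem a_out_eq (pos : Int) :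
    getKingMovesForPos pos = (((aList pos).length : Int) + 1) :: aList pos := by
  unfold getKingMovesForPos aList
  rw [PySem.List.foldl_append_ite
    (p := fun offset => (0 ≤ pos + offset ∧ pos + offset < 64) ∧
            |FILE (pos + offset) - FILE pos| ≤ 1)
    (f := fun offset => pos + offset)]
  simp

theorem b_out_eq (pos : Int) :
    getKingMovesForPos_alt pos = (((bList pos).length : Int) + 1) :: bList pos := rfl

-- same members
theorem mem_iff (pos t : Int) : t ∈ aList pos ↔ t ∈ bList pos := by
  unfold aList bList
  simp only [List.mem_map, List.mem_filter, PySem.List.mem_pyRange_one,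
    decide_eq_true_eq, band7, abs_le,
    PySem.Int.floordiv_eq_ediv_of_pos (b := 8) (by norm_num),
    PySem.Int.mod_eq_emod_of_pos (b := 8) (by norm_num),
    KING_OFFSETS, List.mem_cons, List.not_mem_nil, or_false]
  constructor
  · rintro ⟨off, hoff, hcond, rfl⟩
    omega
  · rintro h
    exact ⟨t - pos, by omega, by omega⟩

theorem list_eq (pos : Int) : aList pos = bList pos := by
  have hKO : KING_OFFSETS.Pairwise (· < ·) := by decide
  have ha : (aList pos).Pairwise (· < ·) := by
    unfold aList
    exact (hKO.sublist List.filter_sublist).map _ (fun a b h => by omega)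
  have hb : (bList pos).Pairwise (· < ·) := by
    unfold bList
    exact List.Pairwise.sublist List.filter_sublist (PySem.List.pairwise_lt_pyRange_one 0 64)
  have hperm : List.Perm (aList pos) (bList pos) := by
    rw [List.perm_ext_iff_of_nodup ha.nodup hb.nodup]
    exact fun t => mem_iff pos t
  exact List.Perm.eq_of_pairwise (fun a b _ _ h1 h2 => le_antisymm h1 h2)
    (ha.imp le_of_lt) (hb.imp le_of_lt) hperm

theorem main_eq (pos : Int) : getKingMovesForPos pos = getKingMovesForPos_alt pos := by
  rw [a_out_eq, b_out_eq, list_eq]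

-- ===== VERDICT (by name: the statement is the Claim_ definition above) =====
theorem getKingMovesForPos_spec : Claim_equal_getKingMovesForPos := by
  intro pos _
  unfold Spec_getKingMovesForPos
  exact main_eq pos
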